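-- pv_equiv track=rewrite | github.com/heijp06/AoC-2015 | day20/lib.py | part2
-- ===== SOURCE A (Python) =====
-- SIZE = 1000000
--
-- def part2(presents, size=SIZE):
--     sieve = [0] * size
--     for elf in range(1, size):
--         present = 11 * elf
--         for house in range(elf, min(size, 50 * elf), elf):
--             sieve[house] += present
--     for elf in range(1, size):
--         if sieve[elf] >= presents:
--             return elf
--     return -1
-- ===== SOURCE B (Python) =====
-- SIZE = 1000000
--
-- def part2(presents, size=SIZE):
--     # per-house: enumerate elf-visit counts q = house // elf (at most 49),
--     # so house's total is sum over q in 1..49 with q | house of 11 * (house // q)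
--     for house in range(1, size):
--         total = 0
--         for q in range(1, 50):
--             if house % q == 0:
--                 total += 11 * (house // q)
--         if total >= presents:
--             return house
--     return -1
-- ===== Notes on version B (the rewrite author's own statement) =====
-- stated objective: faster
-- what changed: Replaces A's scatter-write sieve (every elf writes 11*elf into up to 49 array slots, then a second scan) with a sieve-free per-house gather: each house's total is computed directly as the sum of 11*(house//q) over the at most 49 quotients q in 1..49 dividing the house, returning at the first qualifying house.
import Mathlib
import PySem

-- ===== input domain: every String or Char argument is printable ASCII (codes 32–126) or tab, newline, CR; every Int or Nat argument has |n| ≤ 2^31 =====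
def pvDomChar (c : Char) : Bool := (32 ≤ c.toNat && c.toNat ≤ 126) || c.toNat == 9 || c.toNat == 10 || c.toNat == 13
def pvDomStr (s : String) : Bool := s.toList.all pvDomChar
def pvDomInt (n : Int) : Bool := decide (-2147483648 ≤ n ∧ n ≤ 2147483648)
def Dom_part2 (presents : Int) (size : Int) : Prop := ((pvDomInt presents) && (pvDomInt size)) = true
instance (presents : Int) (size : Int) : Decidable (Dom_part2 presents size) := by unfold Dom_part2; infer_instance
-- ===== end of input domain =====

-- B replaces A's scatter-write sieve over all elves by a per-house divisor-sum
-- (enumerating the ≤ 49 possible quotients house // elf) with early exit; objective: faster (measured).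

-- ===== PORT A =====
def part2 (presents : Int) (size : Int) : Int :=
  let sieve : List Int :=
    (PySem.List.pyRange 1 size 1).foldl (fun sv elf =>
      let present := 11 * elf
      (PySem.List.pyRange elf (min size (50 * elf)) elf).foldl
        (fun s house => s.set house.toNat (PySem.List.pyGetD s house 0 + present)) sv)
      (List.replicate size.toNat 0)
  match (PySem.List.pyRange 1 size 1).find?
      (fun elf => decide (presents ≤ PySem.List.pyGetD sieve elf 0)) with
  | some e => e
  | none => -1

-- ===== PORT B =====
def houseTotal (house : Int) : Int :=
  (PySem.List.pyRange 1 50 1).foldl (fun total q =>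
    if PySem.Int.mod house q = 0 then total + 11 * PySem.Int.floordiv house q else total) 0

def part2_alt (presents : Int) (size : Int) : Int :=
  match (PySem.List.pyRange 1 size 1).find?
      (fun house => decide (presents ≤ houseTotal house)) with
  | some h => h
  | none => -1

-- ===== PRECONDITION & SPEC =====
def Spec_part2 (presents : Int) (size : Int) (out : Int) : Prop := out = part2_alt presents size
instance (presents : Int) (size : Int) (out : Int) : Decidable (Spec_part2 presents size out) := by unfold Spec_part2; infer_instance

-- ===== CLAIM (what is proved, stated in full; the proofs are below) =====
def Claim_equal_part2 : Prop := ∀ (presents : Int) (size : Int), Dom_part2 presents size → Spec_part2 presents size (part2 presents size)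

-- ===== LEMMAS AND PROOFS =====

-- generic: find? only depends on the predicate's values on the list
theorem find?_congr_mem {α : Type} (l : List α) (p q : α → Bool)
    (h : ∀ a ∈ l, p a = q a) : l.find? p = l.find? q := by
  induction l with
  | nil => rfl
  | cons a t ih =>
    simp only [List.find?_cons]
    rw [h a (List.mem_cons_self)]
    cases q a with
    | true => rfl
    | false => exact ih (fun x hx => h x (List.mem_cons_of_mem _ hx))

-- the inner write loop preserves length
theorem writeFold_length (l : List Int) (sv : List Int) (p : Int) :
    (l.foldl (fun s house => s.set house.toNat (PySem.List.pyGetD s house 0 + p)) sv).length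
      = sv.length := by
  induction l generalizing sv with
  | nil => rfl
  | cons a t ih => simp [List.foldl_cons, ih, List.length_set]

-- value at index j after the inner write loop: old value + (count of j among writes) * p
theorem writeFold_getD (l : List Int) (sv : List Int) (j : Nat) (p : Int)
    (hpos : ∀ x ∈ l, 0 ≤ x) (hlt : ∀ x ∈ l, x.toNat < sv.length) (hj : j < sv.length) :
    (l.foldl (fun s house => s.set house.toNat (PySem.List.pyGetD s house 0 + p)) sv).getD j 0
      = sv.getD j 0 + (List.count ((j : Int)) l : Int) * p := by
  induction l generalizing sv with
  | nil => simp
  | cons a t ih =>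
    have ha0 : 0 ≤ a := hpos a (List.mem_cons_self)
    have halt : a.toNat < sv.length := hlt a (List.mem_cons_self)
    simp only [List.foldl_cons]
    rw [ih _ (fun x hx => hpos x (List.mem_cons_of_mem _ hx))
        (fun x hx => by simpa [List.length_set] using hlt x (List.mem_cons_of_mem _ hx))
        (by simpa [List.length_set] using hj)]
    rw [PySem.List.pyGetD_of_nonneg _ _ ha0, List.count_cons]
    have hjset : j < (sv.set a.toNat (sv.getD a.toNat 0 + p)).length := by
      simpa [List.length_set] using hj
    rw [List.getD_eq_getElem _ _ hjset, List.getD_eq_getElem _ _ hj]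
    by_cases hEq : a.toNat = j
    · subst hEq
      rw [List.getElem_set_self hjset]
      have haj : (a == ((a.toNat : Nat) : Int)) = true := by simp; omega
      rw [haj, if_pos rfl]
      rw [List.getD_eq_getElem _ _ halt]
      push_cast
      ring
    · rw [List.getElem_set_ne hEq]
      have haj : (a == ((j : Nat) : Int)) = false := by
        simp only [beq_eq_false_iff_ne, ne_eq]
        intro hcon; apply hEq; omega
      rw [haj]
      simp

-- the inner range for elf e: membership characterisation
theorem mem_innerRange (e m x : Int) (he : 1 ≤ e) :
    x ∈ PySem.List.pyRange e m e ↔ e ≤ x ∧ x < m ∧ e ∣ x := by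
  rw [PySem.List.mem_pyRange_iff_of_pos (by omega)]
  constructor
  · rintro ⟨h1, h2, h3⟩
    exact ⟨h1, h2, by have := dvd_add h3 (dvd_refl e); simpa using this⟩
  · rintro ⟨h1, h2, h3⟩
    exact ⟨h1, h2, dvd_sub h3 (dvd_refl e)⟩

-- the inner range has no duplicates
theorem nodup_innerRange (e m : Int) (he : 1 ≤ e) :
    (PySem.List.pyRange e m e).Nodup := by
  rw [PySem.List.pyRange_of_pos _ _ (by omega : (0:Int) < e)]
  exact (List.nodup_range).map (fun k₁ k₂ h => by
    have : e * (k₁ : Int) = e * k₂ := by omega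
    have := mul_left_cancel₀ (by omega : (e:Int) ≠ 0) this
    exact_mod_cast this)

-- count of j in the inner range
theorem count_innerRange (e m j : Int) (he : 1 ≤ e) :
    (List.count j (PySem.List.pyRange e m e) : Int)
      = if e ≤ j ∧ j < m ∧ e ∣ j then 1 else 0 := by
  by_cases hmem : j ∈ PySem.List.pyRange e m e
  · rw [List.count_eq_one_of_mem (nodup_innerRange e m he) hmem]
    rw [if_pos ((mem_innerRange e m j he).mp hmem)]
    rfl
  · rw [List.count_eq_zero.mpr hmem]
    rw [if_neg (fun hc => hmem ((mem_innerRange e m j he).mpr hc))]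
    rfl

-- value at index j.toNat of the sieve after folding the outer loop over any elf list
theorem outerFold_getD (size : Int) (L : List Int) (sv : List Int) (j : Int)
    (hsv : sv.length = size.toNat) (hL : ∀ e ∈ L, 1 ≤ e) (hj0 : 0 ≤ j) (hjs : j < size) :
    (L.foldl (fun sv elf =>
        (PySem.List.pyRange elf (min size (50 * elf)) elf).foldl
          (fun s house => s.set house.toNat (PySem.List.pyGetD s house 0 + 11 * elf)) sv) sv).getD j.toNat 0
      = sv.getD j.toNat 0
        + (L.map (fun e => if e ≤ j ∧ j < min size (50 * e) ∧ e ∣ j then 11 * e else 0)).sum := by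
  induction L generalizing sv with
  | nil => simp
  | cons a t ih =>
    have ha : 1 ≤ a := hL a (List.mem_cons_self)
    simp only [List.foldl_cons, List.map_cons, List.sum_cons]
    have hlen' : ((PySem.List.pyRange a (min size (50*a)) a).foldl
        (fun s house => s.set house.toNat (PySem.List.pyGetD s house 0 + 11 * a)) sv).length = size.toNat := by
      rw [writeFold_length]; exact hsv
    rw [ih _ hlen' (fun x hx => hL x (List.mem_cons_of_mem _ hx))]
    rw [writeFold_getD _ _ _ _
        (fun x hx => by have := (mem_innerRange a _ x ha).mp hx; omega)
        (fun x hx => by have := (mem_innerRange a _ x ha).mp hx; omega)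
        (by omega)]
    rw [count_innerRange _ _ _ ha]
    rw [show ((j.toNat : Nat) : Int) = j by omega]
    split_ifs <;> ring

-- list sum over range = Finset sum over range
theorem sum_map_range (n : Nat) (f : Nat → Int) :
    ((List.range n).map f).sum = ∑ k ∈ Finset.range n, f k := by
  induction n with
  | zero => simp
  | succ m ih => rw [List.range_succ, Finset.sum_range_succ]; simp [ih]

-- sum of an (if q ∣ n then...) over an Ico prefix equals the divisor sum, for any cutoff ≥ both bounds
theorem sum_Ico_dvd_eq (n M : Nat) (hn : 1 ≤ n) (hM : n + 1 ≤ M) (F : Nat → Int) :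
    (∑ q ∈ Finset.Ico 1 M, if q ∣ n then F q else 0) = ∑ q ∈ n.divisors, F q := by
  rw [Nat.divisors]
  rw [Finset.sum_filter]
  refine (Finset.sum_subset (Finset.Ico_subset_Ico le_rfl hM) ?_).symm
  intro x hx hnx
  simp only [Finset.mem_Ico] at hx hnx
  have hxn : ¬ x ∣ n := by
    intro hd
    have := Nat.le_of_dvd (by omega) hd
    omega
  simp [hxn]

-- the key reindexing: summing over divisors e of n the pairs (elf e, quotient n/e)
theorem divisor_reindex (n : Nat) (hn : 1 ≤ n) :
    (∑ e ∈ n.divisors, if n < 50 * e then 11 * (e : Int) else 0)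
      = ∑ q ∈ n.divisors, if q < 50 then 11 * ((n / q : Nat) : Int) else 0 := by
  have h := Nat.sum_div_divisors (α := Int) n (fun d => if n < 50 * d then 11 * (d : Int) else 0)
  rw [← h]
  apply Finset.sum_congr rfl
  intro d hd
  rw [Nat.mem_divisors] at hd
  obtain ⟨hdvd, hne⟩ := hd
  have hd1 : 1 ≤ d := Nat.one_le_iff_ne_zero.mpr (by rintro rfl; simp at hdvd; omega)
  have hq1 : 1 ≤ n / d := Nat.one_le_div_iff (by omega) |>.mpr (Nat.le_of_dvd (by omega) hdvd)
  have hmul : d * (n / d) = n := Nat.mul_div_cancel' hdvd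
  have hiff : n < 50 * (n / d) ↔ d < 50 := by
    constructor
    · intro h50; nlinarith
    · intro h50; nlinarith
  by_cases hc : d < 50
  · rw [if_pos (hiff.mpr hc), if_pos hc]
  · rw [if_neg (fun hcon => hc (hiff.mp hcon)), if_neg hc]

-- A-side: the sieve value at house j equals the divisor sum over the elves
theorem sieve_eq_divsum (size j : Int) (h1 : 1 ≤ j) (hjs : j < size) :
    ((PySem.List.pyRange 1 size 1).foldl (fun sv elf =>
        (PySem.List.pyRange elf (min size (50 * elf)) elf).foldl
          (fun s house => s.set house.toNat (PySem.List.pyGetD s house 0 + 11 * elf)) sv)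
      (List.replicate size.toNat 0)).getD j.toNat 0
      = ∑ e ∈ j.toNat.divisors, if j.toNat < 50 * e then 11 * (e : Int) else 0 := by
  rw [outerFold_getD size _ _ j (by simp) (fun e he => (PySem.List.mem_pyRange_one.mp he).1)
      (by omega) hjs]
  rw [List.getD_eq_getElem?_getD]
  rw [List.getElem?_replicate]
  have hjlt : j.toNat < size.toNat := by omega
  simp only [hjlt, if_pos, Option.getD_some, zero_add]
  -- simplify each term: for e ∈ the range, the condition is e ∣ j ∧ j < 50 e
  have hcong : (PySem.List.pyRange 1 size 1).map
        (fun e => if e ≤ j ∧ j < min size (50 * e) ∧ e ∣ j then 11 * e else 0)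
      = (PySem.List.pyRange 1 size 1).map
        (fun e => if e ∣ j ∧ j < 50 * e then 11 * e else 0) := by
    apply List.map_congr_left
    intro e he
    have h1e : 1 ≤ e := (PySem.List.mem_pyRange_one.mp he).1
    by_cases hd : e ∣ j
    · have hle : e ≤ j := Int.le_of_dvd (by omega) hd
      by_cases h50 : j < 50 * e
      · rw [if_pos ⟨hle, by omega, hd⟩, if_pos ⟨hd, h50⟩]
      · rw [if_neg (by omega), if_neg (by tauto)]
    · rw [if_neg (by tauto), if_neg (by tauto)]
  rw [hcong]
  -- drop the elves above j (they cannot divide j)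
  rw [PySem.List.pyRange_one_append 1 (j+1) size (by omega) (by omega),
      List.map_append, List.sum_append]
  have hzero : ((PySem.List.pyRange (j+1) size 1).map
      (fun e => if e ∣ j ∧ j < 50 * e then 11 * e else 0)).sum = 0 := by
    apply List.sum_eq_zero
    intro x hx
    simp only [List.mem_map] at hx
    obtain ⟨e, he, rfl⟩ := hx
    have hje : j + 1 ≤ e := (PySem.List.mem_pyRange_one.mp he).1
    have : ¬ e ∣ j := fun hd => by have := Int.le_of_dvd (by omega) hd; omega
    rw [if_neg (by tauto)]
  rw [hzero, add_zero]
  -- convert to a Finset sum over Nat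
  rw [PySem.List.pyRange_one, List.map_map, sum_map_range]
  have hshift : ∑ k ∈ Finset.range (j + 1 - 1).toNat,
        ((fun e => if e ∣ j ∧ j < 50 * e then 11 * e else 0) ∘ fun k : Nat => 1 + (k : Int)) k
      = ∑ q ∈ Finset.Ico 1 (j.toNat + 1),
          if (q : Int) ∣ j ∧ j < 50 * (q : Int) then 11 * ((q : Nat) : Int) else 0 := by
    rw [Finset.sum_Ico_eq_sum_range]
    apply Finset.sum_congr (by congr 1; omega)
    intro k _
    simp only [Function.comp]
    congr 1
  rw [hshift]
  have hterm : ∀ q ∈ Finset.Ico 1 (j.toNat + 1),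
      (if (q : Int) ∣ j ∧ j < 50 * (q:Int) then 11 * ((q:Nat):Int) else 0)
        = if q ∣ j.toNat then (if j.toNat < 50 * q then 11 * ((q:Nat):Int) else 0) else 0 := by
    intro q hq
    have hjq : ((q:Int) ∣ j) ↔ (q ∣ j.toNat) := by
      rw [show j = ((j.toNat : Nat) : Int) by omega]
      exact_mod_cast Int.natCast_dvd_natCast
    have hlt : (j < 50 * (q:Int)) ↔ (j.toNat < 50 * q) := by omega
    rw [ite_and]
    by_cases hd : q ∣ j.toNat
    · rw [if_pos (hjq.mpr hd), if_pos hd]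
      exact if_congr hlt rfl rfl
    · rw [if_neg (fun hc => hd (hjq.mp hc)), if_neg hd]
  rw [Finset.sum_congr rfl hterm]
  exact sum_Ico_dvd_eq j.toNat (j.toNat+1) (by omega) le_rfl _

-- B-side: houseTotal as a divisor sum
theorem houseTotal_eq_divsum (j : Int) (h1 : 1 ≤ j) :
    houseTotal j = ∑ q ∈ j.toNat.divisors, if q < 50 then 11 * ((j.toNat / q : Nat) : Int) else 0 := by
  unfold houseTotal
  -- turn the conditional fold into a sum of conditional terms
  have hfold : ∀ (l : List Int) (init : Int),
      l.foldl (fun total q =>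
        if PySem.Int.mod j q = 0 then total + 11 * PySem.Int.floordiv j q else total) init
      = init + (l.map (fun q => if q ∣ j then 11 * PySem.Int.floordiv j q else 0)).sum := by
    intro l
    induction l with
    | nil => simp
    | cons a t ih =>
      intro init
      simp only [List.foldl_cons, List.map_cons, List.sum_cons, ih]
      by_cases hd : a ∣ j
      · rw [if_pos ((PySem.Int.mod_eq_zero_iff_dvd j a).mpr hd), if_pos hd]; ring
      · rw [if_neg (fun c => hd ((PySem.Int.mod_eq_zero_iff_dvd j a).mp c)), if_neg hd]; ring
  rw [hfold, zero_add]
  rw [PySem.List.pyRange_one, List.map_map, sum_map_range]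
  have hshift : ∑ k ∈ Finset.range ((50:Int) - 1).toNat,
        ((fun q => if q ∣ j then 11 * PySem.Int.floordiv j q else 0) ∘ fun k : Nat => 1 + (k : Int)) k
      = ∑ q ∈ Finset.Ico (1:Nat) 50,
          if (q:Int) ∣ j then 11 * PySem.Int.floordiv j (q:Int) else 0 := by
    rw [Finset.sum_Ico_eq_sum_range]
    apply Finset.sum_congr (by decide)
    intro k _
    simp only [Function.comp]
    congr 1
  rw [hshift]
  -- rewrite each term into Nat form with an explicit q < 50 flag
  have hterm : ∀ q ∈ Finset.Ico (1:Nat) (max 50 (j.toNat + 1)),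
      (if q ∈ Finset.Ico (1:Nat) 50 then (if (q:Int) ∣ j then 11 * PySem.Int.floordiv j (q:Int) else 0) else 0)
        = if q ∣ j.toNat then (if q < 50 then 11 * ((j.toNat / q : Nat) : Int) else 0) else 0 := by
    intro q hq
    rw [Finset.mem_Ico] at hq
    by_cases hq50 : q < 50
    · rw [if_pos (Finset.mem_Ico.mpr ⟨hq.1, hq50⟩)]
      have hjq : ((q:Int) ∣ j) ↔ (q ∣ j.toNat) := by
        rw [show j = ((j.toNat : Nat) : Int) by omega]
        exact_mod_cast Int.natCast_dvd_natCast
      by_cases hd : q ∣ j.toNat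
      · rw [if_pos (hjq.mpr hd), if_pos hd, if_pos hq50]
        congr 1
        rw [PySem.Int.floordiv_eq_ediv_of_pos (by exact_mod_cast hq.1)]
        rw [show j = ((j.toNat : Nat) : Int) by omega]
        exact_mod_cast (Int.natCast_div j.toNat q).symm
      · rw [if_neg (fun hc => hd (hjq.mp hc)), if_neg hd]
    · rw [if_neg (by simp [Finset.mem_Ico]; omega)]
      by_cases hd : q ∣ j.toNat
      · rw [if_pos hd, if_neg hq50]
      · rw [if_neg hd]
  calc (∑ q ∈ Finset.Ico (1:Nat) 50, if (q:Int) ∣ j then 11 * PySem.Int.floordiv j (q:Int) else 0)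
      = ∑ q ∈ Finset.Ico (1:Nat) (max 50 (j.toNat + 1)),
          if q ∈ Finset.Ico (1:Nat) 50 then (if (q:Int) ∣ j then 11 * PySem.Int.floordiv j (q:Int) else 0) else 0 := by
        rw [Finset.sum_ite_mem]
        rw [Finset.inter_eq_right.mpr (Finset.Ico_subset_Ico le_rfl (le_max_left _ _))]
    _ = ∑ q ∈ Finset.Ico (1:Nat) (max 50 (j.toNat + 1)),
          if q ∣ j.toNat then (if q < 50 then 11 * ((j.toNat / q : Nat) : Int) else 0) else 0 :=
        Finset.sum_congr rfl hterm
    _ = ∑ q ∈ j.toNat.divisors, if q < 50 then 11 * ((j.toNat / q : Nat) : Int) else 0 :=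
        sum_Ico_dvd_eq j.toNat _ (by omega) (by omega) _

-- main equality of the two find? predicates on houses inside the scan
theorem sieve_eq_houseTotal (size j : Int) (h1 : 1 ≤ j) (hjs : j < size) :
    ((PySem.List.pyRange 1 size 1).foldl (fun sv elf =>
        (PySem.List.pyRange elf (min size (50 * elf)) elf).foldl
          (fun s house => s.set house.toNat (PySem.List.pyGetD s house 0 + 11 * elf)) sv)
      (List.replicate size.toNat 0)).getD j.toNat 0 = houseTotal j := by
  rw [sieve_eq_divsum size j h1 hjs, houseTotal_eq_divsum j h1,
      divisor_reindex j.toNat (by omega)]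

-- ===== VERDICT (by name: the statement is the Claim_ definition above) =====
theorem part2_spec : Claim_equal_part2 := by
  intro presents size _
  unfold Spec_part2 part2 part2_alt
  have hfind : (PySem.List.pyRange 1 size 1).find?
      (fun elf => decide (presents ≤ PySem.List.pyGetD
        ((PySem.List.pyRange 1 size 1).foldl (fun sv elf =>
          (PySem.List.pyRange elf (min size (50 * elf)) elf).foldl
            (fun s house => s.set house.toNat (PySem.List.pyGetD s house 0 + 11 * elf)) sv)
          (List.replicate size.toNat 0)) elf 0))
      = (PySem.List.pyRange 1 size 1).find? (fun house => decide (presents ≤ houseTotal house)) := by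
    apply find?_congr_mem
    intro a ha
    have hb := PySem.List.mem_pyRange_one.mp ha
    rw [PySem.List.pyGetD_of_nonneg _ _ (by omega : (0:Int) ≤ a)]
    rw [sieve_eq_houseTotal size a hb.1 hb.2]
  simp only [hfind]
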